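-- pv_equiv track=rewrite | github.com/hmyunis/legacy-keeper | backend/media/natural_language_search.py | _map_alias_to_media_type
-- ===== SOURCE A (Python) =====
-- MEDIA_TYPE_ALIASES = {
--     "PHOTO": {
--         "photo",
--         "photos",
--         "picture",
--         "pictures",
--         "pic",
--         "pics",
--         "image",
--         "images",
--         "snapshot",
--         "snapshots",
--     },
--     "VIDEO": {
--         "video",
--         "videos",
--         "movie",
--         "movies",
--         "clip",
--         "clips",
--         "footage",
--         "film",
--         "films",
--     },
--     "DOCUMENT": {
--         "document",
--         "documents",
--         "doc",
--         "docs",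
--         "pdf",
--         "letter",
--         "letters",
--         "certificate",
--         "certificates",
--         "paper",
--         "papers",
--     },
-- }
--
-- def _map_alias_to_media_type(value: str) -> str | None:
--     normalized = str(value or "").strip().lower()
--     if not normalized:
--         return None
--     for media_type, aliases in MEDIA_TYPE_ALIASES.items():
--         if normalized in aliases:
--             return media_type
--     return None
-- ===== SOURCE B (Python) =====
-- MEDIA_TYPE_ALIASES = {
--     "PHOTO": {
--         "photo", "photos", "picture", "pictures", "pic", "pics",
--         "image", "images", "snapshot", "snapshots",
--     },
--     "VIDEO": {
--         "video", "videos", "movie", "movies", "clip", "clips",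
--         "footage", "film", "films",
--     },
--     "DOCUMENT": {
--         "document", "documents", "doc", "docs", "pdf", "letter",
--         "letters", "certificate", "certificates", "paper", "papers",
--     },
-- }
--
-- # Flat reverse index built once: alias -> media type (one O(1) lookup per call).
-- _REVERSE = {
--     alias: media_type
--     for media_type, aliases in MEDIA_TYPE_ALIASES.items()
--     for alias in aliases
-- }
--
-- def _map_alias_to_media_type(value: str) -> str | None:
--     normalized = str(value or "").strip().lower()
--     if not normalized:
--         return None
--     return _REVERSE.get(normalized)
-- ===== Notes on version B (the rewrite author's own statement) =====
-- stated objective: idiomatic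
-- what changed: Replaces the per-call scan over the three category alias-sets with a module-level flat reverse map alias->media_type built once, so the function body is a single dictionary lookup after the same normalization and empty-string guard.
import Mathlib
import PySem

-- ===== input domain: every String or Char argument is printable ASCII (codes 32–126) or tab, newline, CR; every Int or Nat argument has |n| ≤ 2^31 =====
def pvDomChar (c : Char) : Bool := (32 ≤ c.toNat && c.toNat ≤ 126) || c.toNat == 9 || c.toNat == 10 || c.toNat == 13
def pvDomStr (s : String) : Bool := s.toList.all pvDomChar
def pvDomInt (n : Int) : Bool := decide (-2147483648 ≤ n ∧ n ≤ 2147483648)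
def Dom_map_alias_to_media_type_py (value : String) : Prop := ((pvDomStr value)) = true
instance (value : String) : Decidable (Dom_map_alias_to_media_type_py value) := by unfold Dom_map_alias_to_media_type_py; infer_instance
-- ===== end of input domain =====

-- B builds a flat reverse map alias -> media type once and does a single lookup;
-- A scans the three category alias-sets per call. Return values proved equal on Dom.

-- ===== PORT A =====
def pvPhotoAliases : PySem.Set String :=
  PySem.Set.ofList ["photo", "photos", "picture", "pictures", "pic", "pics",
    "image", "images", "snapshot", "snapshots"]

def pvVideoAliases : PySem.Set String :=
  PySem.Set.ofList ["video", "videos", "movie", "movies", "clip", "clips",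
    "footage", "film", "films"]

def pvDocumentAliases : PySem.Set String :=
  PySem.Set.ofList ["document", "documents", "doc", "docs", "pdf", "letter",
    "letters", "certificate", "certificates", "paper", "papers"]

-- MEDIA_TYPE_ALIASES.items(), in insertion order
def pvAliasTable : List (String × PySem.Set String) :=
  [("PHOTO", pvPhotoAliases), ("VIDEO", pvVideoAliases), ("DOCUMENT", pvDocumentAliases)]

-- the 'for media_type, aliases in MEDIA_TYPE_ALIASES.items(): if normalized in aliases: return media_type' loop
def pvScan (n : String) : List (String × PySem.Set String) → Option String
  | [] => none
  | (mediaType, aliases) :: rest =>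
      if PySem.Set.contains aliases n then some mediaType else pvScan n rest

def map_alias_to_media_type_py (value : String) : Option String :=
  let base := if value == "" then "" else value   -- str(value or "")
  let normalized := PySem.Str.lower (PySem.Str.strip base)
  if normalized == "" then none
  else pvScan normalized pvAliasTable

-- ===== PORT B =====
-- _REVERSE = {alias: media_type for media_type, aliases in MEDIA_TYPE_ALIASES.items() for alias in aliases}
def pvReverse : PySem.Dict String String :=
  PySem.Dict.ofList
    ((["photo", "photos", "picture", "pictures", "pic", "pics",
       "image", "images", "snapshot", "snapshots"].map (fun a => (a, "PHOTO"))) ++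
     (["video", "videos", "movie", "movies", "clip", "clips",
       "footage", "film", "films"].map (fun a => (a, "VIDEO"))) ++
     (["document", "documents", "doc", "docs", "pdf", "letter",
       "letters", "certificate", "certificates", "paper", "papers"].map (fun a => (a, "DOCUMENT"))))

def map_alias_to_media_type_py_alt (value : String) : Option String :=
  let base := if value == "" then "" else value   -- str(value or "")
  let normalized := PySem.Str.lower (PySem.Str.strip base)
  if normalized == "" then none
  else pvReverse.get? normalized

-- ===== PRECONDITION & SPEC =====
def Spec_map_alias_to_media_type_py (value : String) (out : Option String) : Prop := out = map_alias_to_media_type_py_alt value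
instance (value : String) (out : Option String) : Decidable (Spec_map_alias_to_media_type_py value out) := by unfold Spec_map_alias_to_media_type_py; infer_instance

-- ===== CLAIM (what is proved, stated in full; the proofs are below) =====
def Claim_equal_map_alias_to_media_type_py : Prop := ∀ (value : String), Dom_map_alias_to_media_type_py value → Spec_map_alias_to_media_type_py value (map_alias_to_media_type_py value)

-- ===== LEMMAS AND PROOFS =====
theorem pvScan_eq_get? (n : String) : pvScan n pvAliasTable = pvReverse.get? n := by
  by_cases h0 : n = "photo"
  · subst h0; decide
  by_cases h1 : n = "photos"
  · subst h1; decide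
  by_cases h2 : n = "picture"
  · subst h2; decide
  by_cases h3 : n = "pictures"
  · subst h3; decide
  by_cases h4 : n = "pic"
  · subst h4; decide
  by_cases h5 : n = "pics"
  · subst h5; decide
  by_cases h6 : n = "image"
  · subst h6; decide
  by_cases h7 : n = "images"
  · subst h7; decide
  by_cases h8 : n = "snapshot"
  · subst h8; decide
  by_cases h9 : n = "snapshots"
  · subst h9; decide
  by_cases h10 : n = "video"
  · subst h10; decide
  by_cases h11 : n = "videos"
  · subst h11; decide
  by_cases h12 : n = "movie"
  · subst h12; decide
  by_cases h13 : n = "movies"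
  · subst h13; decide
  by_cases h14 : n = "clip"
  · subst h14; decide
  by_cases h15 : n = "clips"
  · subst h15; decide
  by_cases h16 : n = "footage"
  · subst h16; decide
  by_cases h17 : n = "film"
  · subst h17; decide
  by_cases h18 : n = "films"
  · subst h18; decide
  by_cases h19 : n = "document"
  · subst h19; decide
  by_cases h20 : n = "documents"
  · subst h20; decide
  by_cases h21 : n = "doc"
  · subst h21; decide
  by_cases h22 : n = "docs"
  · subst h22; decide
  by_cases h23 : n = "pdf"
  · subst h23; decide
  by_cases h24 : n = "letter"
  · subst h24; decide
  by_cases h25 : n = "letters"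
  · subst h25; decide
  by_cases h26 : n = "certificate"
  · subst h26; decide
  by_cases h27 : n = "certificates"
  · subst h27; decide
  by_cases h28 : n = "paper"
  · subst h28; decide
  by_cases h29 : n = "papers"
  · subst h29; decide
  · have hR : pvReverse = PySem.Dict.mk [("photo", "PHOTO"), ("photos", "PHOTO"), ("picture", "PHOTO"), ("pictures", "PHOTO"), ("pic", "PHOTO"), ("pics", "PHOTO"), ("image", "PHOTO"), ("images", "PHOTO"), ("snapshot", "PHOTO"), ("snapshots", "PHOTO"), ("video", "VIDEO"), ("videos", "VIDEO"), ("movie", "VIDEO"), ("movies", "VIDEO"), ("clip", "VIDEO"), ("clips", "VIDEO"), ("footage", "VIDEO"), ("film", "VIDEO"), ("films", "VIDEO"), ("document", "DOCUMENT"), ("documents", "DOCUMENT"), ("doc", "DOCUMENT"), ("docs", "DOCUMENT"), ("pdf", "DOCUMENT"), ("letter", "DOCUMENT"), ("letters", "DOCUMENT"), ("certificate", "DOCUMENT"), ("certificates", "DOCUMENT"), ("paper", "DOCUMENT"), ("papers", "DOCUMENT")] := by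
      apply PySem.Dict.ext; decide
    rw [hR]
    simp [pvScan, pvAliasTable, pvPhotoAliases, pvVideoAliases, pvDocumentAliases,
      PySem.Set.contains, PySem.Set.ofList, PySem.Dict.get?, h0, h1, h2, h3, h4, h5, h6, h7, h8, h9, h10, h11, h12, h13, h14, h15, h16, h17, h18, h19, h20, h21, h22, h23, h24, h25, h26, h27, h28, h29, Ne.symm h0, Ne.symm h1, Ne.symm h2, Ne.symm h3, Ne.symm h4, Ne.symm h5, Ne.symm h6, Ne.symm h7, Ne.symm h8, Ne.symm h9, Ne.symm h10, Ne.symm h11, Ne.symm h12, Ne.symm h13, Ne.symm h14, Ne.symm h15, Ne.symm h16, Ne.symm h17, Ne.symm h18, Ne.symm h19, Ne.symm h20, Ne.symm h21, Ne.symm h22, Ne.symm h23, Ne.symm h24, Ne.symm h25, Ne.symm h26, Ne.symm h27, Ne.symm h28, Ne.symm h29]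

-- ===== VERDICT (by name: the statement is the Claim_ definition above) =====
theorem map_alias_to_media_type_py_spec : Claim_equal_map_alias_to_media_type_py := by
  intro value _
  unfold Spec_map_alias_to_media_type_py
  simp only [map_alias_to_media_type_py, map_alias_to_media_type_py_alt]
  by_cases h : PySem.Str.lower (PySem.Str.strip (if value == "" then "" else value)) == ""
  · simp only [if_pos h]
  · simp only [if_neg h]; exact pvScan_eq_get? _
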